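-- pv_equiv track=rewrite | github.com/skyrim4ev3r/leetcode_problems | 1_easy/03679_compute_decimal_representation/solution.py | decimalRepresentation
-- ===== SOURCE A (Python) =====
-- from typing import List
--
-- def decimalRepresentation(n: int) -> List[int]:
--     multiplier = 1
--     res = []
--     while n > 0:
--         tmp = (n % 10) * multiplier;
--         if tmp != 0:
--             res.append(tmp)
--         multiplier *= 10
--         n //= 10
--
--     res.reverse()
--
--     return res
-- ===== SOURCE B (Python) =====
-- from typing import List
--
-- def decimalRepresentation(n: int) -> List[int]:
--     # Recursive: most-significant values first by construction, no reverse.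
--     if n <= 0:
--         return []
--     rest = [v * 10 for v in decimalRepresentation(n // 10)]
--     d = n % 10
--     return rest + ([d] if d else [])
-- ===== Notes on version B (the rewrite author's own statement) =====
-- stated objective: alternative
-- what changed: Replaces the iterative while-loop with a multiplier accumulator and a final reverse by a direct structural recursion on the quotient that builds the result most-significant-first (scaling the recursive result by the base), needing no multiplier state and no reverse.
import Mathlib
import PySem

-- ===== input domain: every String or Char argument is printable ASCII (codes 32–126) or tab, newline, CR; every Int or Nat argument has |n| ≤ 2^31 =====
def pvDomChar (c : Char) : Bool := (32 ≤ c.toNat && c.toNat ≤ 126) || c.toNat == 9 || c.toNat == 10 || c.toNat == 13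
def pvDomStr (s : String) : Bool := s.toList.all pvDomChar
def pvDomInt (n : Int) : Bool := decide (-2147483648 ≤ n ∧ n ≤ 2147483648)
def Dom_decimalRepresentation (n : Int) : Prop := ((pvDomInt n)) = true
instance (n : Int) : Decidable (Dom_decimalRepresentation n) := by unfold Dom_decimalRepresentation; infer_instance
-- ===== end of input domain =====

-- B replaces A's while-loop + multiplier accumulator + final reverse by a direct
-- structural recursion on n // 10 that builds the result most-significant-first
-- (objective: alternative decomposition; same values for every int).

-- ===== PORT A =====
-- the while loop: state (n, multiplier, res)
def decimalRepresentationLoop (n mult : Int) (res : List Int) : List Int :=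
  if _h : n > 0 then
    decimalRepresentationLoop (PySem.Int.floordiv n 10) (mult * 10)
      (res ++ (if (PySem.Int.mod n 10) * mult ≠ 0 then [(PySem.Int.mod n 10) * mult] else []))
  else res
termination_by n.toNat
decreasing_by
  rw [PySem.Int.floordiv_eq_ediv_of_pos (by norm_num)]
  omega

def decimalRepresentation (n : Int) : List Int :=
  (decimalRepresentationLoop n 1 []).reverse

-- ===== PORT B =====
def decimalRepresentation_alt (n : Int) : List Int :=
  if _h : n ≤ 0 then []
  else
    ((decimalRepresentation_alt (PySem.Int.floordiv n 10)).map (fun v => v * 10)) ++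
      (if PySem.Int.mod n 10 ≠ 0 then [PySem.Int.mod n 10] else [])
termination_by n.toNat
decreasing_by
  rw [PySem.Int.floordiv_eq_ediv_of_pos (by norm_num)]
  omega

-- ===== PRECONDITION & SPEC =====
def Spec_decimalRepresentation (n : Int) (out : List Int) : Prop := out = decimalRepresentation_alt n
instance (n : Int) (out : List Int) : Decidable (Spec_decimalRepresentation n out) := by unfold Spec_decimalRepresentation; infer_instance

-- ===== CLAIM (what is proved, stated in full; the proofs are below) =====
def Claim_equal_decimalRepresentation : Prop := ∀ (n : Int), Dom_decimalRepresentation n → Spec_decimalRepresentation n (decimalRepresentation n)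

-- ===== LEMMAS AND PROOFS =====

-- loop invariant: the loop appends, low place first, the reversed scaled result of B
lemma decimalRepresentationLoop_eq (k : Nat) : ∀ (n : Int), n.toNat = k →
    ∀ (mult : Int) (res : List Int), 0 < mult →
    decimalRepresentationLoop n mult res
      = res ++ ((decimalRepresentation_alt n).reverse.map (fun v => v * mult)) := by
  induction k using Nat.strong_induction_on with
  | _ k ih =>
    intro n hk mult res hm
    rw [decimalRepresentationLoop, decimalRepresentation_alt]
    by_cases h : n > 0
    · have hnle : ¬ n ≤ 0 := by omega
      simp only [h, hnle, dite_true, dite_false]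
      have hlt : (PySem.Int.floordiv n 10).toNat < k := by
        rw [PySem.Int.floordiv_eq_ediv_of_pos (by norm_num)]
        omega
      rw [ih _ hlt _ rfl (mult * 10) _ (by positivity)]
      by_cases hdvd : (10 : Int) ∣ n
      · simp [hdvd, List.map_map]
        exact fun a _ => Or.inl (mul_comm mult 10)
      · simp [hdvd, hm.ne', List.map_map, mul_comm]
        intro a _
        ring
    · have hnle : n ≤ 0 := by omega
      simp [h, hnle]

theorem decimalRepresentation_spec : Claim_equal_decimalRepresentation := by
  intro n _
  unfold Spec_decimalRepresentation decimalRepresentation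
  rw [decimalRepresentationLoop_eq n.toNat n rfl 1 [] (by norm_num)]
  simp
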